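-- pv_equiv track=rewrite | github.com/Blaze-F/-python-java- | Python/main.py | solution
-- ===== SOURCE A (Python) =====
-- def solution(wallpaper):
--
--     #시작점 x,y 표시
--     #첫 등장에 잡아버리기 (break)
--     for y, str in enumerate(wallpaper):
--         if "#" in str:
--             lux = str.index("#")
--             luy = y
--             break
--     #end x,y 표시
--     for y, str in enumerate(wallpaper):
--         if "#" in str:
--             rdx = str.index("#")
--             rdy = y
--
--
--
--
--
--     #정리
--     answer = [lux, luy, rdx, rdy]
--     return answer
--
--
--
--     #정리
--     answer = [lux, luy, rdx, rdy]
--     return answer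
-- ===== SOURCE B (Python) =====
-- def solution(wallpaper):
--     # One first-hit scanner, applied forwards for the top-left corner and to the
--     # reversed row list for the bottom-right corner (both short-circuit).
--     def first_hit(rows):
--         for y, line in rows:
--             if "#" in line:
--                 return [line.index("#"), y]
--     lu = first_hit(enumerate(wallpaper))
--     rd = first_hit(reversed(list(enumerate(wallpaper))))
--     return lu + rd
-- ===== Notes on version B (the rewrite author's own statement) =====
-- stated objective: alternative
-- what changed: A single short-circuiting first-hit helper is applied twice -- forwards for the top-left corner and over the reversed row list for the bottom-right -- replacing A's second full pass that keeps overwriting (rdx,rdy) to the end.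
import Mathlib
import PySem

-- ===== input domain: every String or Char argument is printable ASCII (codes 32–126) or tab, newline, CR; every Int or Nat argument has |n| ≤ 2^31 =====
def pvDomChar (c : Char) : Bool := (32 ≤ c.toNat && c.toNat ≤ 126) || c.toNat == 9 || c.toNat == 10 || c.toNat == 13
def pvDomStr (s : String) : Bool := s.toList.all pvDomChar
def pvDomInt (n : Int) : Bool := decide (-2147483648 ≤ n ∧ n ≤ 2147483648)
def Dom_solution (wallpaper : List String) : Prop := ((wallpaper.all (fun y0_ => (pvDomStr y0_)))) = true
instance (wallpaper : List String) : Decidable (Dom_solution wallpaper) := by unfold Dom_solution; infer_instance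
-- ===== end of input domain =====

-- B finds both corners with one short-circuiting first-hit helper, applied forwards and to the
-- reversed row list, instead of A's second full overwrite pass; equality of the return value is
-- proved on Pre_ (some row contains '#'; otherwise both Pythons raise: A UnboundLocalError,
-- B TypeError).


-- ===== PORT A =====
-- first loop: break at the first row containing '#'
def solFirstLoop : List (Int × String) → Option (Int × Int)
  | [] => none
  | (y, s) :: rest =>
      if PySem.Str.isIn "#" s then some (PySem.Str.find s "#", y) else solFirstLoop rest

def solution (wallpaper : List String) : List Int :=
  let first := solFirstLoop (PySem.List.enumerate wallpaper)
  -- second loop: full scan, last assignment wins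
  let last := (PySem.List.enumerate wallpaper).foldl
      (fun acc p => if PySem.Str.isIn "#" p.2 then some (PySem.Str.find p.2 "#", p.1) else acc) none
  match first, last with
  | some (lux, luy), some (rdx, rdy) => [lux, luy, rdx, rdy]
  | _, _ => []   -- Python raises here (no '#'); excluded by Pre_

-- ===== PORT B =====
-- B's helper first_hit: return [line.index('#'), y] at the first row containing '#'
def firstHitB : List (Int × String) → Option (List Int)
  | [] => none
  | (y, s) :: rest =>
      if PySem.Str.isIn "#" s then some [PySem.Str.find s "#", y] else firstHitB rest

def solution_alt (wallpaper : List String) : List Int :=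
  let lu := firstHitB (PySem.List.enumerate wallpaper)
  let rd := firstHitB (PySem.List.enumerate wallpaper).reverse
  match lu with
  | none => []   -- Python raises here (no '#'); excluded by Pre_
  | some a =>
    match rd with
    | none => []
    | some b => a ++ b

-- ===== PRECONDITION & SPEC =====
-- Pre_: some row contains '#' (otherwise A raises UnboundLocalError, B raises TypeError)
def Pre_solution (wallpaper : List String) : Prop :=
  wallpaper.any (fun s => PySem.Str.isIn "#" s) = true
instance (wallpaper : List String) : Decidable (Pre_solution wallpaper) := by
  unfold Pre_solution; infer_instance

def pvWitness_solution : List String := ["..", ".#.", "##"]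

def Spec_solution (wallpaper : List String) (out : List Int) : Prop := out = solution_alt wallpaper
instance (wallpaper : List String) (out : List Int) : Decidable (Spec_solution wallpaper out) := by unfold Spec_solution; infer_instance

-- ===== CLAIM (what is proved, stated in full; the proofs are below) =====
def Claim_equal_solution : Prop := ∀ (wallpaper : List String), Dom_solution wallpaper → Pre_solution wallpaper → Spec_solution wallpaper (solution wallpaper)

-- ===== LEMMAS AND PROOFS =====

lemma solFirstLoop_append (xs ys : List (Int × String)) :
    solFirstLoop (xs ++ ys) = (solFirstLoop xs).or (solFirstLoop ys) := by
  induction xs with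
  | nil => rfl
  | cons p rest ih =>
    obtain ⟨y, s⟩ := p
    by_cases h : PySem.Chars.isIn ['#'] s.toList = true <;>
      simp [solFirstLoop, h, ih]

-- A's second loop returns the first hit of the reversed list, else the accumulator
lemma solFoldl_eq_rev (l : List (Int × String)) (a : Option (Int × Int)) :
    l.foldl (fun acc p => if PySem.Str.isIn "#" p.2 then some (PySem.Str.find p.2 "#", p.1) else acc) a
      = (solFirstLoop l.reverse).or a := by
  induction l generalizing a with
  | nil => rfl
  | cons p rest ih =>
    obtain ⟨y, s⟩ := p
    rw [List.foldl_cons, ih, List.reverse_cons, solFirstLoop_append]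
    by_cases h : PySem.Chars.isIn ['#'] s.toList = true <;>
      cases hr : solFirstLoop rest.reverse <;>
      simp [solFirstLoop, h]

-- B's helper is A's first-loop value wrapped as a two-element list
lemma firstHitB_eq (l : List (Int × String)) :
    firstHitB l = (solFirstLoop l).map (fun q => [q.1, q.2]) := by
  induction l with
  | nil => rfl
  | cons p rest ih =>
    obtain ⟨y, s⟩ := p
    by_cases h : PySem.Chars.isIn ['#'] s.toList = true <;>
      simp [firstHitB, solFirstLoop, h, ih]

lemma solFirstLoop_rev_none (l : List (Int × String)) :
    solFirstLoop l.reverse = none ↔ solFirstLoop l = none := by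
  induction l with
  | nil => simp
  | cons p rest ih =>
    obtain ⟨y, s⟩ := p
    rw [List.reverse_cons, solFirstLoop_append]
    by_cases h : PySem.Chars.isIn ['#'] s.toList = true <;>
      cases hr : solFirstLoop rest.reverse <;>
      simp_all [solFirstLoop]

-- ===== VERDICT (by name: the statement is the Claim_ definition above) =====
theorem solution_spec : Claim_equal_solution := by
  intro wallpaper _ _
  unfold Spec_solution solution solution_alt
  rw [solFoldl_eq_rev, firstHitB_eq, firstHitB_eq]
  cases hf : solFirstLoop (PySem.List.enumerate wallpaper) with
  | none =>
    rw [(solFirstLoop_rev_none _).mpr hf]; rfl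
  | some q =>
    obtain ⟨lux, luy⟩ := q
    cases hr : solFirstLoop (PySem.List.enumerate wallpaper).reverse with
    | none =>
      exact absurd ((solFirstLoop_rev_none _).mp hr) (by simp [hf])
    | some r =>
      obtain ⟨rdx, rdy⟩ := r
      simp
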